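-- pv_equiv track=rewrite | github.com/DataLab-atom/eacn_example_004 | results/T6_rcs_simulation.py | sycamore_like_couplers
-- ===== SOURCE A (Python) =====
-- def sycamore_like_couplers(nrows, ncols):
--     """Generate 2D grid couplers, grouped into ABCD patterns."""
--     couplers = []
--     for r in range(nrows):
--         for c in range(ncols):
--             idx = r * ncols + c
--             # horizontal
--             if c + 1 < ncols:
--                 couplers.append((idx, idx + 1, 'h', (r + c) % 2))
--             # vertical
--             if r + 1 < nrows:
--                 couplers.append((idx, idx + ncols, 'v', (r + c) % 2))
--     # Group into 4 patterns: h-even, h-odd, v-even, v-odd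
--     groups = {i: [] for i in range(4)}
--     for q1, q2, direction, parity in couplers:
--         if direction == 'h':
--             groups[parity].append((q1, q2))
--         else:
--             groups[2 + parity].append((q1, q2))
--     return groups
-- ===== SOURCE B (Python) =====
-- def sycamore_like_couplers(nrows, ncols):
--     """Generate 2D grid couplers, grouped into ABCD patterns.
--
--     Builds the four pattern lists directly (one comprehension per group)
--     instead of materialising a tagged edge list and dispatching it."""
--     h_even = [(r * ncols + c, r * ncols + c + 1)
--               for r in range(nrows) for c in range(ncols)
--               if c + 1 < ncols and (r + c) % 2 == 0]
--     h_odd = [(r * ncols + c, r * ncols + c + 1)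
--              for r in range(nrows) for c in range(ncols)
--              if c + 1 < ncols and (r + c) % 2 == 1]
--     v_even = [(r * ncols + c, r * ncols + c + ncols)
--               for r in range(nrows) for c in range(ncols)
--               if r + 1 < nrows and (r + c) % 2 == 0]
--     v_odd = [(r * ncols + c, r * ncols + c + ncols)
--              for r in range(nrows) for c in range(ncols)
--              if r + 1 < nrows and (r + c) % 2 == 1]
--     return {0: h_even, 1: h_odd, 2: v_even, 3: v_odd}
-- ===== Notes on version B (the rewrite author's own statement) =====
-- stated objective: alternative
-- what changed: Replaces the tagged-edge accumulation plus dict-dispatch second pass with four direct grid comprehensions, one per ABCD group, preserving r-major/c-minor order.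
import Mathlib
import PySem

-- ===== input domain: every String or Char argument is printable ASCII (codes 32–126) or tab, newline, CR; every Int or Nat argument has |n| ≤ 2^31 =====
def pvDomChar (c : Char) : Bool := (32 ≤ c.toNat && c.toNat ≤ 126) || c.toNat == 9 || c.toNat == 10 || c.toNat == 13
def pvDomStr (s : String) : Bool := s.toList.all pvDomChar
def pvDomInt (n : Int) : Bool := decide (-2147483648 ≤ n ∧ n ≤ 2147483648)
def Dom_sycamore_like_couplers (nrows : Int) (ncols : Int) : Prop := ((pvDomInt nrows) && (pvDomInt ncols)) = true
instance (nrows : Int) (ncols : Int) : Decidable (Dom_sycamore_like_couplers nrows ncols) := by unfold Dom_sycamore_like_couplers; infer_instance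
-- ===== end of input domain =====

-- B replaces A's tagged-edge list + dict dispatch with four direct grid comprehensions (same cost, different decomposition).


-- ===== PORT A =====
def sycamore_like_couplers (nrows : Int) (ncols : Int) : List (Int × List (Int × Int)) :=
  let couplers : List (Int × Int × String × Int) :=
    (PySem.List.pyRange 0 nrows 1).foldl (fun acc r =>
      (PySem.List.pyRange 0 ncols 1).foldl (fun acc c =>
        let idx := r * ncols + c
        let acc := if c + 1 < ncols then acc ++ [(idx, idx + 1, "h", PySem.Int.mod (r + c) 2)] else acc
        if r + 1 < nrows then acc ++ [(idx, idx + ncols, "v", PySem.Int.mod (r + c) 2)] else acc) acc) []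
  let groups0 : PySem.Dict Int (List (Int × Int)) :=
    (PySem.List.pyRange 0 4 1).foldl (fun d i => d.insert i []) PySem.Dict.empty
  let groups := couplers.foldl (fun d t =>
      if t.2.2.1 == "h" then d.modify t.2.2.2 [] (· ++ [(t.1, t.2.1)])
      else d.modify (2 + t.2.2.2) [] (· ++ [(t.1, t.2.1)])) groups0
  groups.items

-- ===== PORT B =====
def sycamore_like_couplers_alt (nrows : Int) (ncols : Int) : List (Int × List (Int × Int)) :=
  let hEven := (PySem.List.pyRange 0 nrows 1).flatMap (fun r =>
    (PySem.List.pyRange 0 ncols 1).flatMap (fun c =>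
      if c + 1 < ncols ∧ PySem.Int.mod (r + c) 2 = 0 then [(r * ncols + c, r * ncols + c + 1)] else []))
  let hOdd := (PySem.List.pyRange 0 nrows 1).flatMap (fun r =>
    (PySem.List.pyRange 0 ncols 1).flatMap (fun c =>
      if c + 1 < ncols ∧ PySem.Int.mod (r + c) 2 = 1 then [(r * ncols + c, r * ncols + c + 1)] else []))
  let vEven := (PySem.List.pyRange 0 nrows 1).flatMap (fun r =>
    (PySem.List.pyRange 0 ncols 1).flatMap (fun c =>
      if r + 1 < nrows ∧ PySem.Int.mod (r + c) 2 = 0 then [(r * ncols + c, r * ncols + c + ncols)] else []))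
  let vOdd := (PySem.List.pyRange 0 nrows 1).flatMap (fun r =>
    (PySem.List.pyRange 0 ncols 1).flatMap (fun c =>
      if r + 1 < nrows ∧ PySem.Int.mod (r + c) 2 = 1 then [(r * ncols + c, r * ncols + c + ncols)] else []))
  [(0, hEven), (1, hOdd), (2, vEven), (3, vOdd)]

-- ===== PRECONDITION & SPEC =====
def Spec_sycamore_like_couplers (nrows : Int) (ncols : Int) (out : List (Int × List (Int × Int))) : Prop := out = sycamore_like_couplers_alt nrows ncols
instance (nrows : Int) (ncols : Int) (out : List (Int × List (Int × Int))) : Decidable (Spec_sycamore_like_couplers nrows ncols out) := by unfold Spec_sycamore_like_couplers; infer_instance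

-- ===== CLAIM (what is proved, stated in full; the proofs are below) =====
def Claim_equal_sycamore_like_couplers : Prop := ∀ (nrows : Int) (ncols : Int), Dom_sycamore_like_couplers nrows ncols → Spec_sycamore_like_couplers nrows ncols (sycamore_like_couplers nrows ncols)

-- ===== LEMMAS AND PROOFS =====

-- the dispatch key and payload of one tagged edge
def pvKey (t : Int × Int × String × Int) : Int := if t.2.2.1 == "h" then t.2.2.2 else 2 + t.2.2.2
def pvPair (t : Int × Int × String × Int) : Int × Int := (t.1, t.2.1)
def pvSel (i : Int) (l : List (Int × Int × String × Int)) : List (Int × Int) :=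
  (l.filter (fun t => pvKey t == i)).map pvPair

-- the two tagged edges one grid cell contributes
def pvCell (nrows ncols r c : Int) : List (Int × Int × String × Int) :=
  (if c + 1 < ncols then [(r * ncols + c, r * ncols + c + 1, "h", PySem.Int.mod (r + c) 2)] else []) ++
  (if r + 1 < nrows then [(r * ncols + c, r * ncols + c + ncols, "v", PySem.Int.mod (r + c) 2)] else [])

lemma pvSel_cons (i : Int) (t : Int × Int × String × Int) (l : List (Int × Int × String × Int)) :
    pvSel i (t :: l) = (if pvKey t == i then [pvPair t] else []) ++ pvSel i l := by
  simp [pvSel, List.filter_cons]; split <;> simp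

lemma pv_modify0 (a b c d : List (Int × Int)) (p : Int × Int) :
    (PySem.Dict.mk [((0:Int), a), (1, b), (2, c), (3, d)]).modify 0 [] (· ++ [p])
    = PySem.Dict.mk [(0, a ++ [p]), (1, b), (2, c), (3, d)] := by
  simp [PySem.Dict.modify, PySem.Dict.insert, PySem.Dict.getD, PySem.Dict.get?, PySem.Dict.contains]

lemma pv_modify1 (a b c d : List (Int × Int)) (p : Int × Int) :
    (PySem.Dict.mk [((0:Int), a), (1, b), (2, c), (3, d)]).modify 1 [] (· ++ [p])
    = PySem.Dict.mk [(0, a), (1, b ++ [p]), (2, c), (3, d)] := by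
  simp [PySem.Dict.modify, PySem.Dict.insert, PySem.Dict.getD, PySem.Dict.get?, PySem.Dict.contains]

lemma pv_modify2 (a b c d : List (Int × Int)) (p : Int × Int) :
    (PySem.Dict.mk [((0:Int), a), (1, b), (2, c), (3, d)]).modify 2 [] (· ++ [p])
    = PySem.Dict.mk [(0, a), (1, b), (2, c ++ [p]), (3, d)] := by
  simp [PySem.Dict.modify, PySem.Dict.insert, PySem.Dict.getD, PySem.Dict.get?, PySem.Dict.contains]

lemma pv_modify3 (a b c d : List (Int × Int)) (p : Int × Int) :
    (PySem.Dict.mk [((0:Int), a), (1, b), (2, c), (3, d)]).modify 3 [] (· ++ [p])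
    = PySem.Dict.mk [(0, a), (1, b), (2, c), (3, d ++ [p])] := by
  simp [PySem.Dict.modify, PySem.Dict.insert, PySem.Dict.getD, PySem.Dict.get?, PySem.Dict.contains]

lemma pv_dispatch (l : List (Int × Int × String × Int))
    (hl : ∀ t ∈ l, t.2.2.2 = 0 ∨ t.2.2.2 = 1) (a b c d : List (Int × Int)) :
    l.foldl (fun d t =>
        if t.2.2.1 == "h" then d.modify t.2.2.2 [] (· ++ [(t.1, t.2.1)])
        else d.modify (2 + t.2.2.2) [] (· ++ [(t.1, t.2.1)]))
      (PySem.Dict.mk [(0, a), (1, b), (2, c), (3, d)])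
    = PySem.Dict.mk [(0, a ++ pvSel 0 l), (1, b ++ pvSel 1 l), (2, c ++ pvSel 2 l), (3, d ++ pvSel 3 l)] := by
  induction l generalizing a b c d with
  | nil => simp [pvSel]
  | cons t l ih =>
    obtain ⟨q1, q2, dir, par⟩ := t
    have hpar : par = 0 ∨ par = 1 := hl (q1, q2, dir, par) (by simp)
    have hl' : ∀ t ∈ l, t.2.2.2 = 0 ∨ t.2.2.2 = 1 := fun t ht => hl t (by simp [ht])
    rw [List.foldl_cons]
    by_cases hdir : dir == "h"
    · rcases hpar with hp | hp <;> subst hp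
      · rw [if_pos hdir, pv_modify0, ih hl']
        simp [pvSel_cons, pvKey, pvPair, hdir]
      · rw [if_pos hdir, pv_modify1, ih hl']
        simp [pvSel_cons, pvKey, pvPair, hdir]
    · rcases hpar with hp | hp <;> subst hp
      · rw [if_neg hdir, show ((2:Int) + 0) = 2 from by norm_num, pv_modify2, ih hl']
        simp [pvSel_cons, pvKey, pvPair, hdir]
      · rw [if_neg hdir, show ((2:Int) + 1) = 3 from by norm_num, pv_modify3, ih hl']
        simp [pvSel_cons, pvKey, pvPair, hdir]

lemma pv_couplers_flatMap (nrows ncols : Int) :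
    (PySem.List.pyRange 0 nrows 1).foldl (fun acc r =>
      (PySem.List.pyRange 0 ncols 1).foldl (fun acc c =>
        let idx := r * ncols + c
        let acc := if c + 1 < ncols then acc ++ [(idx, idx + 1, "h", PySem.Int.mod (r + c) 2)] else acc
        if r + 1 < nrows then acc ++ [(idx, idx + ncols, "v", PySem.Int.mod (r + c) 2)] else acc) acc) []
    = (PySem.List.pyRange 0 nrows 1).flatMap (fun r =>
        (PySem.List.pyRange 0 ncols 1).flatMap (fun c => pvCell nrows ncols r c)) := by
  have hinner : ∀ (r : Int) (acc : List (Int × Int × String × Int)),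
      (PySem.List.pyRange 0 ncols 1).foldl (fun acc c =>
        let idx := r * ncols + c
        let acc := if c + 1 < ncols then acc ++ [(idx, idx + 1, "h", PySem.Int.mod (r + c) 2)] else acc
        if r + 1 < nrows then acc ++ [(idx, idx + ncols, "v", PySem.Int.mod (r + c) 2)] else acc) acc
      = acc ++ (PySem.List.pyRange 0 ncols 1).flatMap (fun c => pvCell nrows ncols r c) := by
    intro r acc
    have hfun : (fun acc c =>
        let idx := r * ncols + c
        let acc := if c + 1 < ncols then acc ++ [(idx, idx + 1, "h", PySem.Int.mod (r + c) 2)] else acc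
        if r + 1 < nrows then acc ++ [(idx, idx + ncols, "v", PySem.Int.mod (r + c) 2)] else acc)
        = (fun (acc : List (Int × Int × String × Int)) c => acc ++ pvCell nrows ncols r c) := by
      funext acc c
      simp only [pvCell]
      split_ifs <;> simp
    rw [hfun, PySem.List.foldl_append_eq_flatMap]
  have hfun2 : (fun acc r =>
      (PySem.List.pyRange 0 ncols 1).foldl (fun acc c =>
        let idx := r * ncols + c
        let acc := if c + 1 < ncols then acc ++ [(idx, idx + 1, "h", PySem.Int.mod (r + c) 2)] else acc
        if r + 1 < nrows then acc ++ [(idx, idx + ncols, "v", PySem.Int.mod (r + c) 2)] else acc) acc)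
      = (fun (acc : List (Int × Int × String × Int)) r =>
          acc ++ (PySem.List.pyRange 0 ncols 1).flatMap (fun c => pvCell nrows ncols r c)) := by
    funext acc r; exact hinner r acc
  rw [hfun2, PySem.List.foldl_append_eq_flatMap]
  simp

lemma pvSel_flatMap {α : Type} (i : Int) (l : List α) (f : α → List (Int × Int × String × Int)) :
    pvSel i (l.flatMap f) = l.flatMap (fun x => pvSel i (f x)) := by
  simp [pvSel, List.filter_flatMap, List.map_flatMap]

lemma pv_mod_two (x : Int) : PySem.Int.mod x 2 = 0 ∨ PySem.Int.mod x 2 = 1 := by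
  have h1 := PySem.Int.mod_nonneg x (b := 2) (by norm_num)
  have h2 := PySem.Int.mod_lt x (b := 2) (by norm_num)
  omega

lemma pvSel_cell_h (i : Int) (hi : i = 0 ∨ i = 1) (nrows ncols r c : Int) :
    pvSel i (pvCell nrows ncols r c)
    = if c + 1 < ncols ∧ PySem.Int.mod (r + c) 2 = i then [(r * ncols + c, r * ncols + c + 1)] else [] := by
  have hm := pv_mod_two (r + c)
  simp only [pvCell, pvSel, List.filter_append, List.map_append]
  rcases hm with hm | hm <;> rcases hi with hi | hi <;> subst hi <;>
    split_ifs <;> simp_all [pvKey, pvPair] <;> omega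

lemma pvSel_cell_v (i : Int) (hi : i = 2 ∨ i = 3) (nrows ncols r c : Int) :
    pvSel i (pvCell nrows ncols r c)
    = if r + 1 < nrows ∧ PySem.Int.mod (r + c) 2 = i - 2 then [(r * ncols + c, r * ncols + c + ncols)] else [] := by
  have hm := pv_mod_two (r + c)
  simp only [pvCell, pvSel, List.filter_append, List.map_append]
  rcases hm with hm | hm <;> rcases hi with hi | hi <;> subst hi <;>
    split_ifs <;> simp_all [pvKey, pvPair] <;> omega

-- ===== VERDICT (by name: the statement is the Claim_ definition above) =====
theorem sycamore_like_couplers_spec : Claim_equal_sycamore_like_couplers := by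
  intro nrows ncols _
  unfold Spec_sycamore_like_couplers sycamore_like_couplers sycamore_like_couplers_alt
  simp only []
  rw [pv_couplers_flatMap]
  have hinit : ((PySem.List.pyRange 0 4 1).foldl (fun d i => d.insert i ([] : List (Int × Int)))
      PySem.Dict.empty) = PySem.Dict.mk [(0, []), (1, []), (2, []), (3, [])] := by decide
  rw [hinit]
  set L := (PySem.List.pyRange 0 nrows 1).flatMap (fun r =>
    (PySem.List.pyRange 0 ncols 1).flatMap (fun c => pvCell nrows ncols r c)) with hL
  have hl : ∀ t ∈ L, t.2.2.2 = 0 ∨ t.2.2.2 = 1 := by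
    intro t ht
    rw [hL] at ht
    simp only [List.mem_flatMap, pvCell, List.mem_append] at ht
    obtain ⟨r, -, c, -, ht⟩ := ht
    have := pv_mod_two (r + c)
    rcases ht with ht | ht <;> split at ht <;> simp_all
  rw [pv_dispatch L hl]
  simp only [List.nil_append]
  have hsel : ∀ i, pvSel i L = (PySem.List.pyRange 0 nrows 1).flatMap (fun r =>
      (PySem.List.pyRange 0 ncols 1).flatMap (fun c => pvSel i (pvCell nrows ncols r c))) := by
    intro i; rw [hL, pvSel_flatMap]
    exact List.flatMap_congr (fun r _ => pvSel_flatMap i _ _)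
  rw [hsel 0, hsel 1, hsel 2, hsel 3]
  simp only [pvSel_cell_h 0 (Or.inl rfl), pvSel_cell_h 1 (Or.inr rfl),
    pvSel_cell_v 2 (Or.inl rfl), pvSel_cell_v 3 (Or.inr rfl)]
  norm_num
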